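-- pv_equiv track=rewrite | github.com/hackzaid/admanagement | admanagement/services/activity_analysis.py | normalize_iso_datetime
-- ===== SOURCE A (Python) =====
-- def normalize_iso_datetime(value: str) -> str:
--     text = value.strip().replace("Z", "+00:00")
--     if "." not in text:
--         return text
--
--     head, dot, tail = text.partition(".")
--     if not dot:
--         return text
--
--     timezone_markers = ["+", "-"]
--     timezone_index = -1
--     for marker in timezone_markers:
--         candidate_index = tail.find(marker)
--         if candidate_index > 0:
--             timezone_index = candidate_index if timezone_index == -1 else min(timezone_index, candidate_index)
--     if timezone_index == -1:
--         fraction = tail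
--         suffix = ""
--     else:
--         fraction = tail[:timezone_index]
--         suffix = tail[timezone_index:]
--
--     digits = "".join(character for character in fraction if character.isdigit())
--     if not digits:
--         return text
--
--     normalized_fraction = digits[:6].ljust(6, "0")
--     return f"{head}.{normalized_fraction}{suffix}"
-- ===== SOURCE B (Python) =====
-- def normalize_iso_datetime(value: str) -> str:
--     text = value.strip().replace("Z", "+00:00")
--     if "." not in text:
--         return text
--
--     head, _, tail = text.partition(".")
--
--     digits = ""
--     suffix = ""
--     for pos, ch in enumerate(tail):
--         if ch in "+-":
--             suffix = tail[pos:]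
--             break
--         if ch.isdigit():
--             digits += ch
--
--     if not digits:
--         return text
--     return f"{head}.{digits[:6].ljust(6, '0')}{suffix}"
-- ===== Notes on version B (the rewrite author's own statement) =====
-- stated objective: simpler
-- what changed: Replaces the per-marker find() scans and min-combining of timezone indices plus a separate digit comprehension with one left-to-right pass over the fractional tail that collects digits and breaks at the first sign character.
-- intended difference: On inputs whose fractional tail begins directly with a plus or minus sign and contains a digit before the first occurrence of the opposite sign (witness: the input 1.+2), A treats the leading sign as part of the fraction and builds a padded six-digit fraction from the digits found after it, while B treats any sign as the start of the timezone suffix and returns the stripped text unchanged; a fraction cannot begin with a sign, so leaving such malformed input untouched is the intended behaviour. — e.g. on normalize_iso_datetime("1.+2"): A returns "1.200000", B returns "1.+2"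
import Mathlib
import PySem

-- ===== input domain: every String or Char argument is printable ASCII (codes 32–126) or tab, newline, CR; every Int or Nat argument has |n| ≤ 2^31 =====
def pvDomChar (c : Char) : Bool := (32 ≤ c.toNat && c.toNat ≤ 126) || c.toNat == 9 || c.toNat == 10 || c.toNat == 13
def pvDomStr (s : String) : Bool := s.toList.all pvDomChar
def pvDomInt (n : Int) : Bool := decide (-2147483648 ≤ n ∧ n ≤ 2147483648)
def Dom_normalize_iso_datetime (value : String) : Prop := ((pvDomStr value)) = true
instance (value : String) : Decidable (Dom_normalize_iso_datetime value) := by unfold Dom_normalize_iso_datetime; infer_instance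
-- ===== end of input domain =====

-- B replaces A's per-marker find() scans and min-combining of timezone indices plus a separate
-- digit comprehension with one left-to-right pass over the fractional tail (objective: simpler);
-- on tails that begin directly with a sign the two disagree — stated below as D_.

-- text = value.strip().replace("Z", "+00:00")   (shared first line of both programs)
def pvTextOf (valueL : List Char) : List Char :=
  PySem.Chars.replace (PySem.Chars.strip valueL) ['Z'] ['+','0','0',':','0','0']

-- exact port of str.partition(sep) for nonempty sep: split at the first occurrence of sep
def pvPartition (s sep : List Char) : List Char × List Char × List Char :=
  let i := PySem.Chars.find s sep
  if i = -1 then (s, [], [])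
  else (PySem.List.slice s none (some i), sep, PySem.List.slice s (some (i + sep.length)) none)

-- exact port of s.ljust(w, "0"): right-pad with '0' to width w
def pvLjust0 (s : List Char) (w : Nat) : List Char :=
  s ++ List.replicate (w - s.length) '0'

-- ===== PORT A =====
def pvAcore (valueL : List Char) : List Char :=
  let text := pvTextOf valueL
  if !(PySem.Chars.isIn ['.'] text) then text
  else
    let p := pvPartition text ['.']
    let head := p.1
    let dot := p.2.1
    let tail := p.2.2
    if dot = [] then text
    else
      -- for marker in ["+", "-"]: candidate_index = tail.find(marker); …
      let tz := (['+', '-'] : List Char).foldl (fun tzi marker =>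
        let ci := PySem.Chars.find tail [marker]
        if ci > 0 then (if tzi = -1 then ci else min tzi ci) else tzi) (-1 : Int)
      let fs := if tz = -1 then (tail, ([] : List Char))
                else (PySem.List.slice tail none (some tz), PySem.List.slice tail (some tz) none)
      -- "".join(character for character in fraction if character.isdigit())
      let digits := fs.1.filter (fun c => PySem.Chars.isdigit c)
      if digits = [] then text
      else head ++ '.' :: pvLjust0 (PySem.List.slice digits none (some 6)) 6 ++ fs.2

def normalize_iso_datetime (value : String) : String := String.ofList (pvAcore value.toList)

-- ===== PORT B =====
def pvSign (c : Char) : Bool := c == '+' || c == '-'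

-- for pos, ch in enumerate(tail): … break — structural recursion; the remaining list IS tail[pos:]
def pvBscan : List Char → List Char → List Char × List Char
  | [], digits => (digits, [])
  | c :: rs, digits =>
    if pvSign c then (digits, c :: rs)
    else if PySem.Chars.isdigit c then pvBscan rs (digits ++ [c])
    else pvBscan rs digits

def pvBcore (valueL : List Char) : List Char :=
  let text := pvTextOf valueL
  if !(PySem.Chars.isIn ['.'] text) then text
  else
    let p := pvPartition text ['.']
    let ds := pvBscan p.2.2 []
    if ds.1 = [] then text
    else p.1 ++ '.' :: pvLjust0 (PySem.List.slice ds.1 none (some 6)) 6 ++ ds.2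

def normalize_iso_datetime_alt (value : String) : String := String.ofList (pvBcore value.toList)

-- ===== PRECONDITION & SPEC =====
-- after the first '.' of the stripped input: a leading 'Z' (which expands to '+00:00'), or a
-- leading sign with a digit (or, for '+', digit-producing 'Z') before the opposite sign ('Z' also
-- acts as '+')
def pvDraw : List Char → Bool
  | [] => false
  | c :: r =>
    c == 'Z'
      || (c == '+' && (r.takeWhile (fun x => !(x == '-'))).any (fun x => PySem.Chars.isdigit x || x == 'Z'))
      || (c == '-' && (r.takeWhile (fun x => !(x == '+' || x == 'Z'))).any (fun x => PySem.Chars.isdigit x))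

-- On inputs whose fractional tail begins directly with a plus or minus sign and has a digit before
-- the first occurrence of the opposite sign, A treats the leading sign as part of the fraction and
-- builds a padded six-digit fraction from the digits found after it, while B treats any sign as the
-- start of the timezone suffix and returns the stripped text unchanged; a fraction cannot begin
-- with a sign, so leaving such malformed input untouched is the intended behaviour.
def D_normalize_iso_datetime (value : String) : Prop :=
  (let s := PySem.Chars.strip value.toList
   s.contains '.' && pvDraw (s.drop (s.idxOf '.' + 1))) = true
instance (value : String) : Decidable (D_normalize_iso_datetime value) := by
  unfold D_normalize_iso_datetime; infer_instance

def Spec_normalize_iso_datetime (value : String) (out : String) : Prop :=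
  ¬ D_normalize_iso_datetime value → out = normalize_iso_datetime_alt value
instance (value : String) (out : String) : Decidable (Spec_normalize_iso_datetime value out) := by
  unfold Spec_normalize_iso_datetime; infer_instance

def pvDiffWitness_normalize_iso_datetime : String := "1.+2"
def pvDiffWitnessOut_normalize_iso_datetime : String × String := ("1.200000", "1.+2")

-- ===== CLAIM (what is proved, stated in full; the proofs are below) =====
def Claim_unchanged_normalize_iso_datetime : Prop := ∀ (value : String), Dom_normalize_iso_datetime value → Spec_normalize_iso_datetime value (normalize_iso_datetime value)
def Claim_changed_normalize_iso_datetime : Prop := Dom_normalize_iso_datetime (pvDiffWitness_normalize_iso_datetime) ∧ D_normalize_iso_datetime (pvDiffWitness_normalize_iso_datetime) ∧ normalize_iso_datetime (pvDiffWitness_normalize_iso_datetime) = pvDiffWitnessOut_normalize_iso_datetime.1 ∧ normalize_iso_datetime_alt (pvDiffWitness_normalize_iso_datetime) = pvDiffWitnessOut_normalize_iso_datetime.2 ∧ pvDiffWitnessOut_normalize_iso_datetime.1 ≠ pvDiffWitnessOut_normalize_iso_datetime.2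
def Claim_exact_normalize_iso_datetime : Prop := ∀ (value : String), Dom_normalize_iso_datetime value → D_normalize_iso_datetime value → normalize_iso_datetime value ≠ normalize_iso_datetime_alt value

-- ===== LEMMAS AND PROOFS =====

-- the opposite sign character
def pvOther (c : Char) : Char := if c == '+' then '-' else '+'

-- the effect of the Z -> "+00:00" rewrite, written as a character expansion
def pvExpandZ (l : List Char) : List Char :=
  l.flatMap (fun c => if c == 'Z' then ['+','0','0',':','0','0'] else [c])

-- tail = the part of the text after the first '.'
def pvTailOf (text : List Char) : List Char := text.drop (text.idxOf '.' + 1)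

-- text-level change condition: tail begins with a sign and has a digit before the opposite sign
def pvDcheck (tail : List Char) : Bool :=
  match tail with
  | [] => false
  | c :: _ => (c == '+' || c == '-') && (tail.take (tail.idxOf (pvOther c))).any (fun ch => PySem.Chars.isdigit ch)

-- the condition on index i at which A's marker rule fires: a sign at i > 0 that is a first occurrence
def pvQ (t : List Char) (i : Nat) : Bool :=
  match t[i]? with
  | some c => (c == '+' || c == '-') && decide (0 < i) && !((t.take i).contains c)
  | none => false

-- first index satisfying pvQ
def pvFirstQ (t : List Char) (k : Nat) : Option Nat :=
  (List.range' k (t.length - k)).find? (pvQ t)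

lemma pvPrefix_singleton {c : Char} {l : List Char} : [c] <+: l ↔ l.head? = some c := by
  constructor
  · rintro ⟨l', rfl⟩; rfl
  · intro h
    cases l with
    | nil => simp at h
    | cons a l => simp at h; subst h; exact ⟨l, rfl⟩

lemma pvFind_singleton (t : List Char) (c : Char) (i : Nat) :
    PySem.Chars.find t [c] = (i : Int) ↔ t[i]? = some c ∧ ((t.take i).contains c = false) := by
  constructor
  · intro h
    have h0 : (0:Int) ≤ PySem.Chars.find t [c] := by rw [h]; exact Int.natCast_nonneg i
    obtain ⟨h1, h2⟩ := PySem.Chars.find_spec h0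
    rw [h] at h1 h2
    simp only [Int.toNat_natCast] at h1 h2
    refine ⟨by rw [← List.head?_drop]; exact pvPrefix_singleton.mp h1, ?_⟩
    by_contra hc
    simp only [Bool.not_eq_false, List.contains_iff_mem] at hc
    rw [List.mem_take_iff_getElem] at hc
    obtain ⟨j, hj, hcj⟩ := hc
    exact h2 j (lt_of_lt_of_le hj (min_le_left _ _))
      (pvPrefix_singleton.mpr (by rw [List.head?_drop]; simp [List.getElem?_eq_getElem (lt_of_lt_of_le hj (min_le_right _ _)), hcj]))
  · rintro ⟨hi, hni⟩
    have hmem : ∃ j, [c] <+: t.drop j := ⟨i, pvPrefix_singleton.mpr (by rw [List.head?_drop]; exact hi)⟩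
    have h0 : (0:Int) ≤ PySem.Chars.find t [c] := by
      rw [PySem.Chars.find_nonneg_iff, ← PySem.Chars.isIn_iff_infix,
        ← PySem.Chars.exists_prefix_drop_iff_isIn]
      exact hmem
    obtain ⟨h1, h2⟩ := PySem.Chars.find_spec h0
    set k := (PySem.Chars.find t [c]).toNat with hk
    have hkc : t[k]? = some c := by rw [← List.head?_drop]; exact pvPrefix_singleton.mp h1
    have : k = i := by
      rcases Nat.lt_trichotomy k i with hlt | heq | hgt
      · exfalso
        have : c ∈ t.take i := by
          rw [List.mem_take_iff_getElem]
          have hkl : k < t.length := by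
            by_contra hge
            simp [List.getElem?_eq_none (le_of_not_gt hge)] at hkc
          exact ⟨k, lt_min hlt hkl, by simpa [List.getElem?_eq_getElem hkl] using hkc⟩
        simp [List.contains_iff_mem] at hni; exact hni this
      · exact heq
      · exact absurd (pvPrefix_singleton.mpr (by rw [List.head?_drop]; exact hi)) (h2 i hgt)
    omega

lemma pvQ_iff (t : List Char) (i : Nat) :
    pvQ t i = true ↔ 0 < i ∧
      ((PySem.Chars.find t ['+'] = (i : Int) ∧ t[i]? = some '+') ∨
       (PySem.Chars.find t ['-'] = (i : Int) ∧ t[i]? = some '-')) := by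
  unfold pvQ
  cases hg : t[i]? with
  | none => simp
  | some c =>
    simp only [Bool.and_assoc, Bool.and_eq_true, Bool.or_eq_true, beq_iff_eq,
      decide_eq_true_eq, Bool.not_eq_true']
    constructor
    · rintro ⟨hc | hc, hpos, hni⟩
      · subst hc; exact ⟨hpos, Or.inl ⟨(pvFind_singleton t '+' i).mpr ⟨hg, hni⟩, rfl⟩⟩
      · subst hc; exact ⟨hpos, Or.inr ⟨(pvFind_singleton t '-' i).mpr ⟨hg, hni⟩, rfl⟩⟩
    · rintro ⟨hpos, hf | hf⟩
      · obtain ⟨hfind, hgi⟩ := hf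
        injection hgi with hc
        subst hc
        exact ⟨Or.inl rfl, hpos, ((pvFind_singleton t '+' i).mp hfind).2⟩
      · obtain ⟨hfind, hgi⟩ := hf
        injection hgi with hc
        subst hc
        exact ⟨Or.inr rfl, hpos, ((pvFind_singleton t '-' i).mp hfind).2⟩

lemma pvFirstQ_none_iff (t : List Char) :
    pvFirstQ t 0 = none ↔ ∀ i < t.length, pvQ t i = false := by
  unfold pvFirstQ
  rw [List.find?_eq_none]
  simp [List.mem_range']

lemma pvFindRange' (p : Nat → Bool) (n : Nat) : ∀ (k i : Nat),
    (List.range' k n).find? p = some i ↔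
      (k ≤ i ∧ i < k + n ∧ p i = true ∧ ∀ j, k ≤ j → j < i → p j = false) := by
  induction n with
  | zero => intro k i; simp; omega
  | succ n ih =>
    intro k i
    rw [List.range'_succ, List.find?_cons]
    cases hp : p k with
    | true =>
      simp only [Option.some.injEq]
      constructor
      · rintro rfl; exact ⟨le_refl k, by omega, hp, fun j h1 h2 => absurd h1 (by omega)⟩
      · rintro ⟨h1, _, hpi, hmin⟩
        by_contra hne
        have := hmin k (le_refl k) (by omega)
        rw [hp] at this; exact absurd this (by simp)
    | false =>
      rw [ih (k+1) i]
      constructor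
      · rintro ⟨h1, h2, hpi, hmin⟩
        exact ⟨by omega, by omega, hpi, fun j hj1 hj2 => by
          rcases Nat.eq_or_lt_of_le hj1 with rfl | h; exact hp; exact hmin j h hj2⟩
      · rintro ⟨h1, h2, hpi, hmin⟩
        have hki : k ≠ i := by rintro rfl; rw [hp] at hpi; exact absurd hpi (by simp)
        exact ⟨by omega, by omega, hpi, fun j hj1 hj2 => hmin j (by omega) hj2⟩

lemma pvFirstQ_some_iff (t : List Char) (i : Nat) :
    pvFirstQ t 0 = some i ↔ i < t.length ∧ pvQ t i = true ∧ ∀ j < i, pvQ t j = false := by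
  unfold pvFirstQ
  rw [pvFindRange' (pvQ t) (t.length - 0) 0 i]
  constructor
  · rintro ⟨_, h2, h3, h4⟩; exact ⟨by omega, h3, fun j hj => h4 j (by omega) hj⟩
  · rintro ⟨h1, h2, h3⟩; exact ⟨by omega, by omega, h2, fun j _ hj => h3 j hj⟩

lemma pvFindPos_Q (t : List Char) (c : Char) (hm : c = '+' ∨ c = '-')
    (h : 0 < PySem.Chars.find t [c]) :
    pvQ t (PySem.Chars.find t [c]).toNat = true ∧ (PySem.Chars.find t [c]).toNat < t.length := by
  have hcast : PySem.Chars.find t [c] = ((PySem.Chars.find t [c]).toNat : Int) :=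
    (Int.toNat_of_nonneg (le_of_lt h)).symm
  obtain ⟨hg, hni⟩ := (pvFind_singleton t c _).mp hcast
  have hlt : (PySem.Chars.find t [c]).toNat < t.length := by
    by_contra hge
    simp [List.getElem?_eq_none (le_of_not_gt hge)] at hg
  refine ⟨(pvQ_iff t _).mpr ⟨by omega, ?_⟩, hlt⟩
  rcases hm with rfl | rfl
  · exact Or.inl ⟨hcast, hg⟩
  · exact Or.inr ⟨hcast, hg⟩

-- A's marker fold computes exactly the first pvQ index
lemma pvTz_eq (t : List Char) :
    ((['+', '-'] : List Char).foldl (fun tzi marker =>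
        let ci := PySem.Chars.find t [marker]
        if ci > 0 then (if tzi = -1 then ci else min tzi ci) else tzi) (-1 : Int)) =
      (match pvFirstQ t 0 with | none => (-1 : Int) | some i => (i : Int)) := by
  simp only [List.foldl]
  have hQchar : ∀ i, pvQ t i = true →
      (0 < PySem.Chars.find t ['+'] ∧ i = (PySem.Chars.find t ['+']).toNat) ∨
      (0 < PySem.Chars.find t ['-'] ∧ i = (PySem.Chars.find t ['-']).toNat) := by
    intro i hi
    obtain ⟨hpos, hf | hf⟩ := (pvQ_iff t i).mp hi
    · exact Or.inl ⟨by omega, by omega⟩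
    · exact Or.inr ⟨by omega, by omega⟩
  by_cases hp : 0 < PySem.Chars.find t ['+'] <;> by_cases hm : 0 < PySem.Chars.find t ['-']
  · have h1 : pvFirstQ t 0 = some (min (PySem.Chars.find t ['+']) (PySem.Chars.find t ['-'])).toNat := by
      rw [pvFirstQ_some_iff]
      rcases le_total (PySem.Chars.find t ['+']) (PySem.Chars.find t ['-']) with hle | hle
      · obtain ⟨hq, hlt⟩ := pvFindPos_Q t '+' (Or.inl rfl) hp
        rw [min_eq_left hle]
        exact ⟨hlt, hq, fun j hj => by
          by_contra hqj
          simp only [Bool.not_eq_false] at hqj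
          rcases hQchar j hqj with ⟨_, rfl⟩ | ⟨_, rfl⟩ <;> omega⟩
      · obtain ⟨hq, hlt⟩ := pvFindPos_Q t '-' (Or.inr rfl) hm
        rw [min_eq_right hle]
        exact ⟨hlt, hq, fun j hj => by
          by_contra hqj
          simp only [Bool.not_eq_false] at hqj
          rcases hQchar j hqj with ⟨_, rfl⟩ | ⟨_, rfl⟩ <;> omega⟩
    rw [h1]
    split_ifs <;> simp <;> omega
  · have h1 : pvFirstQ t 0 = some (PySem.Chars.find t ['+']).toNat := by
      rw [pvFirstQ_some_iff]
      obtain ⟨hq, hlt⟩ := pvFindPos_Q t '+' (Or.inl rfl) hp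
      exact ⟨hlt, hq, fun j hj => by
        by_contra hqj
        simp only [Bool.not_eq_false] at hqj
        rcases hQchar j hqj with ⟨_, rfl⟩ | ⟨hm', _⟩ <;> omega⟩
    rw [h1]
    split_ifs <;> simp <;> omega
  · have h1 : pvFirstQ t 0 = some (PySem.Chars.find t ['-']).toNat := by
      rw [pvFirstQ_some_iff]
      obtain ⟨hq, hlt⟩ := pvFindPos_Q t '-' (Or.inr rfl) hm
      exact ⟨hlt, hq, fun j hj => by
        by_contra hqj
        simp only [Bool.not_eq_false] at hqj
        rcases hQchar j hqj with ⟨hp', _⟩ | ⟨_, rfl⟩ <;> omega⟩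
    rw [h1]
    split_ifs <;> simp <;> omega
  · have h1 : pvFirstQ t 0 = none := by
      rw [pvFirstQ_none_iff]
      intro i _
      by_contra hqi
      simp only [Bool.not_eq_false] at hqi
      rcases hQchar i hqi with ⟨hp', _⟩ | ⟨hm', _⟩ <;> omega
    rw [h1]
    split_ifs <;> simp <;> omega

-- B's scan: digits of the no-sign prefix, suffix = from the first sign on
lemma pvBscan_char : ∀ (rest digits : List Char),
    pvBscan rest digits =
      (digits ++ (rest.takeWhile (fun c => !pvSign c)).filter (fun c => PySem.Chars.isdigit c),
       rest.dropWhile (fun c => !pvSign c)) := by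
  intro rest
  induction rest with
  | nil => intro digits; simp [pvBscan]
  | cons c rs ih =>
    intro digits
    rw [pvBscan]
    cases hs : pvSign c with
    | true => simp [hs]
    | false =>
      cases hd : PySem.Chars.isdigit c with
      | true => rw [if_neg (by simp [hs]), if_pos rfl, ih]; simp [hs, List.filter_cons, hd]
      | false => rw [if_neg (by simp [hs]), if_neg (by simp [hd]), ih]; simp [hs, List.filter_cons, hd]

-- positional facts about takeWhile/dropWhile
lemma pvTW_take (P : Char → Bool) : ∀ (t : List Char),
    t.take (t.takeWhile P).length = t.takeWhile P ∧
    t.drop (t.takeWhile P).length = t.dropWhile P := by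
  intro t
  induction t with
  | nil => simp
  | cons a t ih =>
    cases hp : P a with
    | true => simp [List.takeWhile_cons, List.dropWhile_cons, hp, ih]
    | false => simp [List.takeWhile_cons, List.dropWhile_cons, hp]

lemma pvTW_mem (P : Char → Bool) : ∀ (t : List Char), ∀ x ∈ t.takeWhile P, P x = true := by
  intro t
  induction t with
  | nil => simp
  | cons a t ih =>
    cases hp : P a with
    | true =>
      intro x hx
      rw [List.takeWhile_cons, if_pos hp] at hx
      rcases List.mem_cons.mp hx with rfl | hx
      · exact hp
      · exact ih x hx
    | false => intro x hx; rw [List.takeWhile_cons, if_neg (by simp [hp])] at hx; simp at hx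

-- first pvQ index when the tail does not start with a sign: the first sign position
lemma pvFirstQ_of_head_not_sign (t : List Char)
    (h : ∀ c, t.head? = some c → pvSign c = false) :
    pvFirstQ t 0 = (match t.dropWhile (fun c => !pvSign c) with
      | [] => none
      | _ :: _ => some (t.takeWhile (fun c => !pvSign c)).length) := by
  have hmemTW : ∀ x ∈ t.takeWhile (fun c => !pvSign c), pvSign x = false := by
    intro x hx
    have := pvTW_mem (fun c => !pvSign c) t x hx
    simpa using this
  cases hdw : t.dropWhile (fun c => !pvSign c) with
  | nil =>
    have htw : t.takeWhile (fun c => !pvSign c) = t := by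
      have := List.takeWhile_append_dropWhile (p := fun c => !pvSign c) (l := t)
      rw [hdw, List.append_nil] at this
      exact this
    rw [pvFirstQ_none_iff]
    intro i hi
    unfold pvQ
    cases hg : t[i]? with
    | none => rfl
    | some x =>
      have hx : x ∈ t := List.mem_of_getElem? hg
      rw [← htw] at hx
      have := hmemTW x hx
      simp only [pvSign, Bool.or_eq_false_iff, beq_eq_false_iff_ne, ne_eq] at this
      simp [this.1, this.2]
  | cons s rs =>
    set j := (t.takeWhile (fun c => !pvSign c)).length with hj
    have htake : t.take j = t.takeWhile (fun c => !pvSign c) := (pvTW_take _ t).1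
    have hdrop : t.drop j = s :: rs := by rw [(pvTW_take _ t).2, hdw]
    have hjlt : j < t.length := by
      have := congrArg List.length hdrop
      simp only [List.length_drop, List.length_cons] at this
      omega
    have hsj : t[j]? = some s := by
      rw [← List.head?_drop, hdrop]; rfl
    have hsign : pvSign s = true := by
      have : s ∈ t.dropWhile (fun c => !pvSign c) := by rw [hdw]; exact List.mem_cons_self
      by_contra hns
      have hPs : (fun c => !pvSign c) s = true := by simp [Bool.not_eq_true] at hns; simp [hns]
      have := List.head?_dropWhile_not (p := fun c => !pvSign c) (l := t)
      rw [hdw] at this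
      simp at this
      simp [this] at hPs
    have hQmem : ∀ i < j, ∀ x, t[i]? = some x → pvSign x = false := by
      intro i hi x hx
      have hil : i < t.length := by
        by_contra hge
        simp [List.getElem?_eq_none (le_of_not_gt hge)] at hx
      have : x ∈ t.take j := by
        rw [List.mem_take_iff_getElem]
        exact ⟨i, lt_min hi hil, by simpa [List.getElem?_eq_getElem hil] using hx⟩
      rw [htake] at this
      exact hmemTW x this
    have hjpos : 0 < j := by
      cases ht : t with
      | nil => rw [ht] at hjlt; simp at hjlt
      | cons a t' =>
        have ha : pvSign a = false := h a (by rw [ht]; rfl)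
        have : (fun c => !pvSign c) a = true := by simp [ha]
        rw [hj, ht, List.takeWhile_cons, if_pos this]
        simp
    rw [pvFirstQ_some_iff]
    refine ⟨hjlt, ?_, ?_⟩
    · unfold pvQ
      rw [hsj]
      have hcont : (t.take j).contains s = false := by
        rw [htake]
        by_contra hc
        simp only [Bool.not_eq_false, List.contains_iff_mem] at hc
        have := hmemTW s hc
        rw [this] at hsign; exact absurd hsign (by simp)
      have : (s == '+' || s == '-') = true := hsign
      have hnm : s ∉ List.take j t := by simpa [List.contains_iff_mem] using hcont
      simp [this, hjpos, hnm]
    · intro i hi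
      unfold pvQ
      cases hg : t[i]? with
      | none => rfl
      | some x =>
        have := hQmem i hi x hg
        simp only [pvSign, Bool.or_eq_false_iff, beq_eq_false_iff_ne, ne_eq] at this
        simp [this.1, this.2]

-- helper: nothing before idxOf equals the sought element
lemma pvNotMem_take_idxOf (c : Char) : ∀ (t : List Char), c ∉ t.take (t.idxOf c) := by
  intro t
  induction t with
  | nil => simp
  | cons a t ih =>
    by_cases h : a = c
    · subst h; simp [List.idxOf_cons_self]
    · rw [List.idxOf_cons_ne _ (by simpa using h), List.take_succ_cons]
      intro hmem
      rcases List.mem_cons.mp hmem with h' | h'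
      · exact h h'.symm
      · exact ih h'

-- first pvQ index when the tail starts with sign c: the first occurrence of the other sign
lemma pvFirstQ_of_head_sign (c : Char) (rest : List Char) (hs : pvSign c = true) :
    pvFirstQ (c :: rest) 0 =
      (if pvOther c ∈ c :: rest then some ((c :: rest).idxOf (pvOther c)) else none) := by
  have hcc : (c = '+' ∧ pvOther c = '-') ∨ (c = '-' ∧ pvOther c = '+') := by
    simp only [pvSign, Bool.or_eq_true, beq_iff_eq] at hs
    rcases hs with rfl | rfl
    · exact Or.inl ⟨rfl, rfl⟩
    · exact Or.inr ⟨rfl, by simp [pvOther]⟩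
  set t := c :: rest with ht
  set c' := pvOther c with hc'
  have hne : c ≠ c' := by rcases hcc with ⟨rfl, h2⟩ | ⟨rfl, h2⟩ <;> rw [h2] <;> decide
  have hsign' : pvSign c' = true := by rcases hcc with ⟨_, h2⟩ | ⟨_, h2⟩ <;> rw [h2] <;> rfl
  have hsignCases : ∀ x : Char, pvSign x = true → x = c ∨ x = c' := by
    intro x hx
    simp only [pvSign, Bool.or_eq_true, beq_iff_eq] at hx
    rcases hcc with ⟨h1, h2⟩ | ⟨h1, h2⟩ <;> rcases hx with rfl | rfl <;> simp [h1, h2]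
  -- pvQ is false wherever the character is c or at index 0
  have hQc : ∀ i, ∀ x, t[i]? = some x → x = c → pvQ t i = false := by
    intro i x hg hx
    subst hx
    unfold pvQ
    rw [hg]
    cases i with
    | zero => simp
    | succ k =>
      have : x ∈ t.take (k + 1) := by rw [ht, List.take_succ_cons]; exact List.mem_cons_self
      simp [List.contains_iff_mem, this]
  by_cases hmem : c' ∈ t
  · rw [if_pos hmem]
    set j := t.idxOf c' with hj
    have hjlt : j < t.length := List.idxOf_lt_length_iff.mpr hmem
    have htj : t[j] = c' := List.getElem_idxOf hjlt
    have hnt : c' ∉ t.take j := pvNotMem_take_idxOf c' t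
    have htj? : t[j]? = some c' := by rw [List.getElem?_eq_getElem hjlt, htj]
    have hjpos : 0 < j := by
      rcases Nat.eq_zero_or_pos j with h0 | h
      · exfalso
        rw [h0, ht] at htj?
        exact hne (by simpa using htj?)
      · exact h
    rw [pvFirstQ_some_iff]
    refine ⟨hjlt, ?_, ?_⟩
    · unfold pvQ
      rw [List.getElem?_eq_getElem hjlt, htj]
      have : (c' == '+' || c' == '-') = true := hsign'
      simp [this, hjpos, List.contains_iff_mem, hnt]
    · intro i hi
      cases hg : t[i]? with
      | none => unfold pvQ; rw [hg]
      | some x =>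
        have hil : i < t.length := by
          by_contra hge
          simp [List.getElem?_eq_none (le_of_not_gt hge)] at hg
        by_cases hsx : pvSign x = true
        · rcases hsignCases x hsx with rfl | rfl
          · exact hQc i x hg rfl
          · exfalso
            apply hnt
            rw [List.mem_take_iff_getElem]
            exact ⟨i, lt_min hi hil, by simpa [List.getElem?_eq_getElem hil] using hg⟩
        · unfold pvQ
          rw [hg]
          simp only [Bool.not_eq_true] at hsx
          simp only [pvSign, Bool.or_eq_false_iff, beq_eq_false_iff_ne, ne_eq] at hsx
          simp [hsx.1, hsx.2]
  · rw [if_neg hmem]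
    rw [pvFirstQ_none_iff]
    intro i hil
    cases hg : t[i]? with
    | none => unfold pvQ; rw [hg]
    | some x =>
      by_cases hsx : pvSign x = true
      · rcases hsignCases x hsx with rfl | rfl
        · exact hQc i x hg rfl
        · exact absurd (List.mem_of_getElem? hg) hmem
      · unfold pvQ
        rw [hg]
        simp only [Bool.not_eq_true] at hsx
        simp only [pvSign, Bool.or_eq_false_iff, beq_eq_false_iff_ne, ne_eq] at hsx
        simp [hsx.1, hsx.2]

-- membership of a single character is exactly Python's 'c in s'
lemma pvMem_isIn (t : List Char) (c : Char) : PySem.Chars.isIn [c] t = true ↔ c ∈ t := by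
  rw [PySem.Chars.isIn_iff_infix]
  constructor
  · intro h; exact h.subset (by simp)
  · intro h
    obtain ⟨l1, l2, rfl⟩ := List.append_of_mem h
    exact ⟨l1, l2, by simp⟩

-- find of a present single character is its first index
lemma pvFind_dot (t : List Char) (h : '.' ∈ t) :
    PySem.Chars.find t ['.'] = (t.idxOf '.' : Int) := by
  apply (pvFind_singleton t '.' _).mpr
  have hl : t.idxOf '.' < t.length := List.idxOf_lt_length_iff.mpr h
  refine ⟨by rw [List.getElem?_eq_getElem hl, List.getElem_idxOf hl], ?_⟩
  simpa [List.contains_iff_mem] using pvNotMem_take_idxOf '.' t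

-- replacing the single character 'Z' is exactly the pvExpandZ character expansion
lemma pvReplaceZ_go (new : List Char) : ∀ (fuel : Nat) (l acc : List Char), l.length ≤ fuel →
    PySem.Chars.replace.go ['Z'] new fuel l acc
      = acc.reverse ++ l.flatMap (fun c => if c == 'Z' then new else [c]) := by
  intro fuel
  induction fuel with
  | zero =>
    intro l acc h
    have hl : l = [] := List.eq_nil_of_length_eq_zero (Nat.le_zero.mp h)
    subst hl
    simp [PySem.Chars.replace.go]
  | succ n ih =>
    intro l acc h
    cases l with
    | nil => simp [PySem.Chars.replace.go]
    | cons c t =>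
      rw [PySem.Chars.replace.go]
      by_cases hc : c = 'Z'
      · subst hc
        rw [if_pos (by simp [List.isPrefixOf])]
        rw [show List.drop (['Z'] : List Char).length ('Z' :: t) = t from rfl]
        rw [ih t _ (Nat.le_of_succ_le_succ (by simpa using h))]
        simp
      · rw [if_neg (by simp [List.isPrefixOf]; exact fun h' => hc h'.symm)]
        rw [ih t _ (Nat.le_of_succ_le_succ h)]
        simp [hc]

lemma pvExpandZ_eq (sL : List Char) :
    pvExpandZ sL = PySem.Chars.replace sL ['Z'] ['+','0','0',':','0','0'] := by
  unfold PySem.Chars.replace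
  rw [if_neg (by simp), pvReplaceZ_go _ sL.length sL [] (le_refl _)]
  simp [pvExpandZ]

lemma pvCore_eq (valueL : List Char)
    (hD : ¬ ('.' ∈ pvTextOf valueL ∧ pvDcheck (pvTailOf (pvTextOf valueL)) = true)) :
    pvAcore valueL = pvBcore valueL := by
  unfold pvAcore pvBcore
  set text := pvTextOf valueL with htext
  by_cases hin : PySem.Chars.isIn ['.'] text = true
  · have hfind : ¬ (PySem.Chars.find text ['.'] = -1) :=
      (PySem.Chars.find_ne_neg_one_iff text ['.']).mpr ((PySem.Chars.isIn_iff_infix ['.'] text).mp hin)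
    have hmem : '.' ∈ text := (pvMem_isIn text '.').mp hin
    have hp22 : (pvPartition text ['.']).2.2 = pvTailOf text := by
      simp only [pvPartition, if_neg hfind]
      rw [pvFind_dot text hmem]
      have hcast : ((text.idxOf '.' : Int) + List.length ['.']) = ((text.idxOf '.' + 1 : Nat) : Int) := by
        push_cast; simp
      rw [hcast, PySem.List.slice_from_natCast, pvTailOf]
    have hp21 : (pvPartition text ['.']).2.1 = ['.'] := by
      simp [pvPartition, if_neg hfind]
    have hD : pvDcheck (pvTailOf text) = false := by
      cases h : pvDcheck (pvTailOf text)
      · rfl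
      · exact absurd ⟨hmem, h⟩ hD
    simp only [hin, Bool.not_true, Bool.false_eq_true, if_false, hp21, hp22,
      reduceCtorEq, if_false]
    rw [pvBscan_char, pvTz_eq]
    set t := pvTailOf text with ht
    cases ht' : t with
    | nil =>
      have hfq : pvFirstQ ([] : List Char) 0 = none := by
        unfold pvFirstQ; simp
      simp [hfq]
    | cons c rest =>
      cases hs : pvSign c with
      | false =>
        have hfq := pvFirstQ_of_head_not_sign (c :: rest)
          (by intro x hx; simp only [List.head?_cons, Option.some.injEq] at hx; rw [← hx]; exact hs)
        cases hdw : (c :: rest).dropWhile (fun x => !pvSign x) with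
        | nil =>
          rw [hdw] at hfq
          have htw : (c :: rest).takeWhile (fun x => !pvSign x) = c :: rest := by
            have := List.takeWhile_append_dropWhile (p := fun x => !pvSign x) (l := c :: rest)
            rw [hdw, List.append_nil] at this
            exact this
          simp [hfq, htw, hdw]
        | cons srs rs =>
          rw [hdw] at hfq
          set j := ((c :: rest).takeWhile (fun x => !pvSign x)).length with hj
          have hfq' : pvFirstQ (c :: rest) 0 = some j := hfq
          have hne : ¬ ((j : Int) = -1) := by omega
          have h1 : List.take j (c :: rest) = (c :: rest).takeWhile (fun x => !pvSign x) := by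
            rw [hj]; exact (pvTW_take (fun x => !pvSign x) (c :: rest)).1
          have h2 : List.drop j (c :: rest) = (c :: rest).dropWhile (fun x => !pvSign x) := by
            rw [hj]; exact (pvTW_take (fun x => !pvSign x) (c :: rest)).2
          simp only [hfq', if_neg hne, PySem.List.slice_to_natCast,
            PySem.List.slice_from_natCast]
          simp [h1, h2, hdw]
      | true =>
        -- A's fraction holds no digit and B finds no digit before the sign: both return text
        have hDc' : ((c :: rest).take ((c :: rest).idxOf (pvOther c))).any
            (fun ch => PySem.Chars.isdigit ch) = false := by
          rw [ht'] at hD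
          unfold pvDcheck at hD
          have hs' : (c == '+' || c == '-') = true := hs
          simpa [hs'] using hD
        have hfilA : ∀ l : List Char, l.any (fun ch => PySem.Chars.isdigit ch) = false →
            l.filter (fun ch => PySem.Chars.isdigit ch) = [] := by
          intro l hl
          rw [List.filter_eq_nil_iff]
          intro x hx
          have := (List.any_eq_false).mp hl x hx
          simp [this]
        have hfq := pvFirstQ_of_head_sign c rest hs
        have htw0 : (c :: rest).takeWhile (fun x => !pvSign x) = [] := by
          rw [List.takeWhile_cons, if_neg (by simp [hs])]
        by_cases hmem : pvOther c ∈ c :: rest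
        · rw [if_pos hmem] at hfq
          set j := (c :: rest).idxOf (pvOther c) with hj
          have hne : ¬ ((j : Int) = -1) := by omega
          simp only [hfq, if_neg hne, htw0, PySem.List.slice_to_natCast, ← hj]
          rw [hfilA _ hDc']
          simp
        · rw [if_neg hmem] at hfq
          have hidx : (c :: rest).idxOf (pvOther c) = (c :: rest).length :=
            List.idxOf_eq_length hmem
          have htake : (c :: rest).take ((c :: rest).idxOf (pvOther c)) = c :: rest := by
            rw [hidx, List.take_length]
          rw [htake] at hDc'
          simp only [hfq, htw0]
          simp [hfilA _ hDc']
  · have hin' : PySem.Chars.isIn ['.'] text = false := by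
      cases h : PySem.Chars.isIn ['.'] text
      · rfl
      · exact absurd h hin
    simp [hin']

-- take up to the first occurrence is takeWhile of disequality
lemma pvTake_idxOf (c : Char) : ∀ w : List Char, w.take (w.idxOf c) = w.takeWhile (fun x => !(x == c)) := by
  intro w
  induction w with
  | nil => simp
  | cons a t ih =>
    by_cases h : a = c
    · subst h; simp [List.idxOf_cons_self, List.takeWhile_cons]
    · rw [List.idxOf_cons_ne _ (by simpa using h), List.take_succ_cons,
        List.takeWhile_cons, if_pos (by simp [h]), ih]

-- digit before the first '-' in the expansion = digit-or-Z before the first '-' in the source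
lemma pvL1 : ∀ r : List Char,
    ((pvExpandZ r).takeWhile (fun x => !(x == '-'))).any (fun x => PySem.Chars.isdigit x)
      = (r.takeWhile (fun x => !(x == '-'))).any (fun x => PySem.Chars.isdigit x || x == 'Z') := by
  intro r
  induction r with
  | nil => simp [pvExpandZ]
  | cons x r ih =>
    by_cases hz : x = 'Z'
    · subst hz
      have h0 : PySem.Chars.isdigit '0' = true := by decide
      simp [pvExpandZ, List.takeWhile_cons, List.any_cons, h0]
    · by_cases hm : x = '-'
      · subst hm; simp [pvExpandZ, List.takeWhile_cons]
      · have hx : (x == '-') = false := by simp [hm]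
        have hxz : (x == 'Z') = false := by simp [hz]
        simp only [pvExpandZ, List.flatMap_cons, hxz, Bool.false_eq_true, if_false,
          List.singleton_append, List.takeWhile_cons, hx, Bool.not_false, if_true,
          List.any_cons, Bool.or_eq_false_iff]
        rw [← pvExpandZ, ih]
        simp [hxz]

-- digit before the first '+' in the expansion = digit before the first '+' or 'Z' in the source
lemma pvL2 : ∀ r : List Char,
    ((pvExpandZ r).takeWhile (fun x => !(x == '+'))).any (fun x => PySem.Chars.isdigit x)
      = (r.takeWhile (fun x => !(x == '+' || x == 'Z'))).any (fun x => PySem.Chars.isdigit x) := by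
  intro r
  induction r with
  | nil => simp [pvExpandZ]
  | cons x r ih =>
    by_cases hz : x = 'Z'
    · subst hz; simp [pvExpandZ, List.takeWhile_cons]
    · by_cases hp : x = '+'
      · subst hp; simp [pvExpandZ, List.takeWhile_cons]
      · have hx : (x == '+') = false := by simp [hp]
        have hxz : (x == 'Z') = false := by simp [hz]
        simp only [pvExpandZ, List.flatMap_cons, hxz, Bool.false_eq_true, if_false,
          List.singleton_append, List.takeWhile_cons, hx, Bool.not_false, if_true,
          List.any_cons, hxz, Bool.or_false]
        rw [← pvExpandZ, ih]

-- the text-level change condition, read back on the source characters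
lemma pvDcheck_expand : ∀ u : List Char, pvDcheck (pvExpandZ u) = pvDraw u := by
  intro u
  cases u with
  | nil => simp [pvExpandZ, pvDcheck, pvDraw]
  | cons c r =>
    by_cases hz : c = 'Z'
    · subst hz
      have hexpZ : pvExpandZ ('Z' :: r) = '+' :: '0' :: '0' :: ':' :: '0' :: '0' :: pvExpandZ r := by
        simp [pvExpandZ, List.flatMap_cons]
      have h0 : PySem.Chars.isdigit '0' = true := by decide
      rw [hexpZ]
      simp only [pvDcheck, pvDraw]
      rw [pvTake_idxOf]
      simp [pvOther, List.takeWhile_cons, List.any_cons, h0]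
    · have hexp : pvExpandZ (c :: r) = c :: pvExpandZ r := by
        simp [pvExpandZ, List.flatMap_cons, hz]
      rw [hexp]
      by_cases hp : c = '+'
      · subst hp
        have hpd : PySem.Chars.isdigit '+' = false := by decide
        simp only [pvDcheck, pvDraw]
        rw [pvTake_idxOf]
        simp only [pvOther, List.takeWhile_cons]
        simp [pvL1 r, hz, hpd]
      · by_cases hm : c = '-'
        · subst hm
          have hmd : PySem.Chars.isdigit '-' = false := by decide
          simp only [pvDcheck, pvDraw]
          rw [pvTake_idxOf]
          simp only [pvOther, List.takeWhile_cons]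
          simp [pvL2 r, hz, hmd]
        · have h1 : (c == '+') = false := by simp [hp]
          have h2 : (c == '-') = false := by simp [hm]
          have h3 : (c == 'Z') = false := by simp [hz]
          simp only [pvDcheck, pvDraw]
          simp [h1, h2, h3]

lemma pvMem_expand (sL : List Char) : '.' ∈ pvExpandZ sL ↔ '.' ∈ sL := by
  simp only [pvExpandZ, List.mem_flatMap]
  constructor
  · rintro ⟨a, ha, hin⟩
    by_cases h : a = 'Z'
    · subst h; simp at hin
    · simp [h] at hin; subst hin; exact ha
  · intro h; exact ⟨'.', h, by decide⟩

lemma pvIdxOf_append (c : Char) : ∀ (xs ys : List Char), c ∉ xs →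
    (xs ++ c :: ys).idxOf c = xs.length := by
  intro xs
  induction xs with
  | nil => intro ys _; simp [List.idxOf_cons_self]
  | cons a t ih =>
    intro ys h
    have ha : a ≠ c := fun he => h (by rw [he]; exact List.mem_cons_self)
    simp only [List.cons_append]
    rw [List.idxOf_cons_ne _ (by simpa using ha), ih ys (fun hc => h (List.mem_cons_of_mem a hc))]
    rfl

lemma pvTail_expand (sL : List Char) (h : '.' ∈ sL) :
    pvTailOf (pvExpandZ sL) = pvExpandZ (sL.drop (sL.idxOf '.' + 1)) := by
  set j := sL.idxOf '.' with hj
  have hjl : j < sL.length := List.idxOf_lt_length_iff.mpr h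
  have hsplit : sL = sL.take j ++ '.' :: sL.drop (j+1) := by
    conv_lhs => rw [← List.take_append_drop j sL]
    rw [List.drop_eq_getElem_cons hjl, List.getElem_idxOf hjl]
  have hnotmem : '.' ∉ sL.take j := pvNotMem_take_idxOf '.' sL
  have hexp : pvExpandZ sL = pvExpandZ (sL.take j) ++ '.' :: pvExpandZ (sL.drop (j+1)) := by
    conv_lhs => rw [hsplit]
    simp [pvExpandZ, List.flatMap_append]
  have hnm2 : '.' ∉ pvExpandZ (sL.take j) := fun hx => hnotmem ((pvMem_expand _).mp hx)
  rw [pvTailOf, hexp, pvIdxOf_append _ _ _ hnm2]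
  rw [show pvExpandZ (sL.take j) ++ '.' :: pvExpandZ (sL.drop (j+1))
        = (pvExpandZ (sL.take j) ++ ['.']) ++ pvExpandZ (sL.drop (j+1)) by simp]
  rw [show (pvExpandZ (sL.take j)).length + 1 = (pvExpandZ (sL.take j) ++ ['.']).length by simp]
  exact List.drop_left

-- inside the change region the two programs really differ: A rebuilds the string with a digit
-- right after the dot, B leaves the text, whose character after the dot is a sign
lemma pvCore_ne (valueL : List Char)
    (hmem : '.' ∈ pvTextOf valueL)
    (hchk : pvDcheck (pvTailOf (pvTextOf valueL)) = true) :
    pvAcore valueL ≠ pvBcore valueL := by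
  unfold pvAcore pvBcore
  set text := pvTextOf valueL with htext
  have hin : PySem.Chars.isIn ['.'] text = true := (pvMem_isIn text '.').mpr hmem
  have hfind : ¬ (PySem.Chars.find text ['.'] = -1) :=
    (PySem.Chars.find_ne_neg_one_iff text ['.']).mpr ((PySem.Chars.isIn_iff_infix ['.'] text).mp hin)
  have hfd : PySem.Chars.find text ['.'] = (text.idxOf '.' : Int) := pvFind_dot text hmem
  have hcast : ((text.idxOf '.' : Int) + List.length ['.']) = ((text.idxOf '.' + 1 : Nat) : Int) := by
    push_cast; simp
  have hp22 : (pvPartition text ['.']).2.2 = pvTailOf text := by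
    simp only [pvPartition, if_neg hfind]
    rw [hfd, hcast, PySem.List.slice_from_natCast, pvTailOf]
  have hp21 : (pvPartition text ['.']).2.1 = ['.'] := by
    simp [pvPartition, if_neg hfind]
  have hp1 : (pvPartition text ['.']).1 = text.take (text.idxOf '.') := by
    simp only [pvPartition, if_neg hfind]
    rw [hfd, PySem.List.slice_to_natCast]
  have hjl : text.idxOf '.' < text.length := List.idxOf_lt_length_iff.mpr hmem
  have hsplit : text = text.take (text.idxOf '.') ++ '.' :: pvTailOf text := by
    conv_lhs => rw [← List.take_append_drop (text.idxOf '.') text]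
    rw [List.drop_eq_getElem_cons hjl, List.getElem_idxOf hjl]
    rfl
  simp only [hin, Bool.not_true, Bool.false_eq_true, if_false, hp21, hp22,
    reduceCtorEq, if_false]
  rw [pvBscan_char, pvTz_eq]
  set t := pvTailOf text with ht
  cases ht' : t with
  | nil => rw [ht'] at hchk; simp [pvDcheck] at hchk
  | cons c rest =>
    rw [ht'] at hchk
    simp only [pvDcheck, Bool.and_eq_true] at hchk
    obtain ⟨hs', hany⟩ := hchk
    have hs : pvSign c = true := hs'
    have htw0 : (c :: rest).takeWhile (fun x => !pvSign x) = [] := by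
      rw [List.takeWhile_cons, if_neg (by simp [hs])]
    have hfq := pvFirstQ_of_head_sign c rest hs
    -- the fraction A extracts and its digits
    have hne_nil : ∀ l : List Char, l.any (fun ch => PySem.Chars.isdigit ch) = true →
        l.filter (fun ch => PySem.Chars.isdigit ch) ≠ [] := by
      intro l hl hnil
      obtain ⟨x, hx, hdx⟩ := List.any_eq_true.mp hl
      exact absurd (List.mem_filter.mpr ⟨hx, hdx⟩) (by simp [hnil])
    have hkey : ∀ digits suf : List Char, digits ≠ [] →
        (∀ x ∈ digits, PySem.Chars.isdigit x = true) →
        (pvPartition text ['.']).1 ++ '.' :: pvLjust0 (PySem.List.slice digits none (some 6)) 6 ++ suf ≠ text := by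
      intro digits suf hdig hisdig he
      have he' : (pvPartition text ['.']).1 ++ '.' :: (pvLjust0 (PySem.List.slice digits none (some 6)) 6 ++ suf) = text := by
        simpa [List.append_assoc] using he
      have he2 := he'.trans hsplit
      rw [hp1, ht'] at he2
      have h3 := List.append_cancel_left he2
      have h4 : pvLjust0 (PySem.List.slice digits none (some 6)) 6 ++ suf = c :: rest := by
        injection h3
      obtain ⟨d, ds, rfl⟩ := List.exists_cons_of_ne_nil hdig
      rw [show ((6:Int)) = ((6:Nat):Int) from rfl, PySem.List.slice_to_natCast,
        List.take_succ_cons] at h4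
      have hdc : d = c := by
        unfold pvLjust0 at h4
        injection h4
      have hd : PySem.Chars.isdigit d = true := hisdig d List.mem_cons_self
      rw [hdc] at hd
      simp only [pvSign, Bool.or_eq_true, beq_iff_eq] at hs
      rcases hs with rfl | rfl <;> simp [PySem.Chars.isdigit] at hd
    have hmemFil : ∀ l : List Char, ∀ x ∈ l.filter (fun ch => PySem.Chars.isdigit ch),
        PySem.Chars.isdigit x = true := by
      intro l x hx
      exact (List.mem_filter.mp hx).2
    by_cases hmemO : pvOther c ∈ c :: rest
    · rw [if_pos hmemO] at hfq
      set j := (c :: rest).idxOf (pvOther c) with hj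
      have hneJ : ¬ ((j : Int) = -1) := by omega
      simp only [hfq, if_neg hneJ, htw0, PySem.List.slice_to_natCast, List.filter_nil,
        List.nil_append, List.append_nil, eq_self_iff_true, if_true]
      rw [if_neg (hne_nil _ hany)]
      exact hkey _ _ (hne_nil _ hany) (hmemFil _)
    · rw [if_neg hmemO] at hfq
      have hidx : (c :: rest).idxOf (pvOther c) = (c :: rest).length :=
        List.idxOf_eq_length hmemO
      have htake : (c :: rest).take ((c :: rest).idxOf (pvOther c)) = c :: rest := by
        rw [hidx, List.take_length]
      rw [htake] at hany
      simp only [hfq, htw0, List.filter_nil, List.nil_append, List.append_nil,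
        eq_self_iff_true, if_true]
      rw [if_neg (hne_nil _ hany)]
      exact fun he => hkey _ [] (hne_nil _ hany) (hmemFil _) (by simpa using he)

-- ===== VERDICT (by name: the statements are the Claim_ definitions above) =====
theorem normalize_iso_datetime_spec : Claim_unchanged_normalize_iso_datetime := by
  intro value _ hD
  unfold normalize_iso_datetime normalize_iso_datetime_alt
  apply congrArg String.ofList
  apply pvCore_eq
  rintro ⟨hmem, hchk⟩
  apply hD
  unfold D_normalize_iso_datetime
  set sL := PySem.Chars.strip value.toList with hs
  have htexteq : pvTextOf value.toList = pvExpandZ sL := (pvExpandZ_eq sL).symm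
  rw [htexteq] at hmem hchk
  have hmem' : '.' ∈ sL := (pvMem_expand sL).mp hmem
  rw [pvTail_expand sL hmem', pvDcheck_expand] at hchk
  simp only [Bool.and_eq_true, List.contains_iff_mem]
  exact ⟨hmem', hchk⟩

theorem normalize_iso_datetime_changed : Claim_changed_normalize_iso_datetime := by
  unfold Claim_changed_normalize_iso_datetime; decide

theorem normalize_iso_datetime_tight : Claim_exact_normalize_iso_datetime := by
  intro value _ hD h
  have hlists : pvAcore value.toList = pvBcore value.toList := by
    have h2 : String.ofList (pvAcore value.toList) = String.ofList (pvBcore value.toList) := h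
    have := congrArg String.toList h2
    rwa [String.toList_ofList, String.toList_ofList] at this
  unfold D_normalize_iso_datetime at hD
  simp only [Bool.and_eq_true, List.contains_iff_mem] at hD
  have htexteq : pvTextOf value.toList = pvExpandZ (PySem.Chars.strip value.toList) :=
    (pvExpandZ_eq _).symm
  apply pvCore_ne value.toList
  · rw [htexteq]; exact (pvMem_expand _).mpr hD.1
  · rw [htexteq, pvTail_expand _ hD.1, pvDcheck_expand]; exact hD.2
  · exact hlists
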